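-- pv_equiv track=rewrite | github.com/malharkrishnashah1406/Capeestone-Project- | src/services/argument_service.py | _calculate_stance_distribution
-- ===== SOURCE A (Python) =====
-- from typing import List, Dict, Any, Optional
--
-- def _calculate_stance_distribution(analyses: List[Dict[str, Any]]) -> Dict[str, int]:
--     """Calculate stance distribution across analyses."""
--     stance_counts = {"support": 0, "oppose": 0, "neutral": 0}
--
--     for analysis in analyses:
--         sentiment = analysis.get("insights", {}).get("stakeholder_sentiment", {})
--         for stance, count in sentiment.items():
--             if stance in stance_counts:
--                 stance_counts[stance] += count
--
--     return stance_counts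
-- ===== SOURCE B (Python) =====
-- def _calculate_stance_distribution(analyses):
--     """Calculate stance distribution across analyses."""
--     return {
--         stance: sum(
--             a.get("insights", {}).get("stakeholder_sentiment", {}).get(stance, 0)
--             for a in analyses
--         )
--         for stance in ("support", "oppose", "neutral")
--     }
-- ===== Notes on version B (the rewrite author's own statement) =====
-- stated objective: simpler
-- what changed: Transposed the traversal: instead of folding analyses into a mutable counts dict and filtering each sentiment's items by key membership, B loops over the three fixed stance keys and for each sums a defaulted lookup across all analyses, with no mutable accumulator.
import Mathlib
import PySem

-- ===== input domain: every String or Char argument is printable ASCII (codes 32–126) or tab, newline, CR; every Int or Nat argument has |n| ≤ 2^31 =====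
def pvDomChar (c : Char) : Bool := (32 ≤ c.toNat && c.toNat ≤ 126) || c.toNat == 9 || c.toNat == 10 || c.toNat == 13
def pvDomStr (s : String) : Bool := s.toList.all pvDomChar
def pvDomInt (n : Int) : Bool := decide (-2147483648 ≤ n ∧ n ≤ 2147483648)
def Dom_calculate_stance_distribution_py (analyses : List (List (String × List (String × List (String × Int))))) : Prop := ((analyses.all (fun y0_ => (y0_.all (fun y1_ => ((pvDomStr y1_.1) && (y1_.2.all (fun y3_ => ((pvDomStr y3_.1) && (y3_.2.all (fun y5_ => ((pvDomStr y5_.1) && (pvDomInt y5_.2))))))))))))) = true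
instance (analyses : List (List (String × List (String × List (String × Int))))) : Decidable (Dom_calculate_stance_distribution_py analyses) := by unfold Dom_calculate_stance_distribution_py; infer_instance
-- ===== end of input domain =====

-- B transposes A's traversal: it loops over the three fixed stance keys and sums a defaulted
-- lookup across all analyses, instead of folding analyses into a mutable counts dict (objective: simpler).

-- ===== PORT A =====
-- A: sentiment = analysis.get("insights", {}).get("stakeholder_sentiment", {})
def pvA_sent (a : List (String × List (String × List (String × Int)))) : PySem.Dict String Int :=
  PySem.Dict.ofList ((PySem.Dict.ofList ((PySem.Dict.ofList a).getD "insights" [])).getD "stakeholder_sentiment" [])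

-- A's inner loop body: if stance in stance_counts: stance_counts[stance] += count
def pvA_step (sc : PySem.Dict String Int) (p : String × Int) : PySem.Dict String Int :=
  if sc.contains p.1 then sc.modify p.1 0 (· + p.2) else sc

def calculate_stance_distribution_py (analyses : List (List (String × List (String × List (String × Int))))) : List (String × Int) :=
  (analyses.foldl (fun sc analysis => (pvA_sent analysis).items.foldl pvA_step sc)
    (((PySem.Dict.empty.insert "support" (0 : Int)).insert "oppose" 0).insert "neutral" 0)).items

-- ===== PORT B =====
-- B: a.get("insights", {}).get("stakeholder_sentiment", {}).get(stance, 0)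
def pvB_get (a : List (String × List (String × List (String × Int)))) (stance : String) : Int :=
  (PySem.Dict.ofList ((PySem.Dict.ofList ((PySem.Dict.ofList a).getD "insights" [])).getD "stakeholder_sentiment" [])).getD stance 0

def calculate_stance_distribution_py_alt (analyses : List (List (String × List (String × List (String × Int))))) : List (String × Int) :=
  ["support", "oppose", "neutral"].map (fun stance => (stance, (analyses.map (fun a => pvB_get a stance)).sum))

-- ===== PRECONDITION & SPEC =====
def Spec_calculate_stance_distribution_py (analyses : List (List (String × List (String × List (String × Int))))) (out : List (String × Int)) : Prop := out = calculate_stance_distribution_py_alt analyses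
instance (analyses : List (List (String × List (String × List (String × Int))))) (out : List (String × Int)) : Decidable (Spec_calculate_stance_distribution_py analyses out) := by unfold Spec_calculate_stance_distribution_py; infer_instance

-- ===== CLAIM (what is proved, stated in full; the proofs are below) =====
def Claim_equal_calculate_stance_distribution_py : Prop := ∀ (analyses : List (List (String × List (String × List (String × Int))))), Dom_calculate_stance_distribution_py analyses → Spec_calculate_stance_distribution_py analyses (calculate_stance_distribution_py analyses)

-- ===== LEMMAS AND PROOFS =====

-- the concrete three-key counts dict A maintains
def pvMkD (a b c : Int) : PySem.Dict String Int := PySem.Dict.mk [("support", a), ("oppose", b), ("neutral", c)]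

-- sum of the values of l at key k
def pvW (l : List (String × Int)) (k : String) : Int := ((l.filter (fun p => p.1 == k)).map (·.2)).sum

lemma pvW_not_mem (l : List (String × Int)) (k : String) (h : k ∉ l.map (·.1)) : pvW l k = 0 := by
  induction l with
  | nil => rfl
  | cons p t ih =>
    simp only [List.map_cons, List.mem_cons, not_or] at h
    simp [pvW, List.filter_cons, (by simpa using Ne.symm h.1 : ¬ (p.1 == k) = true)]
    simpa [pvW] using ih h.2

lemma pvW_eq_getD (l : List (String × Int)) (k : String) (h : (l.map (·.1)).Nodup) :
    pvW l k = (PySem.Dict.mk l).getD k 0 := by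
  induction l with
  | nil => simp [pvW, PySem.Dict.getD, PySem.Dict.get?]
  | cons p t ih =>
    simp only [List.map_cons, List.nodup_cons] at h
    by_cases hk : p.1 = k
    · have ht : pvW t k = 0 := pvW_not_mem t k (hk ▸ h.1)
      have h1 : pvW (p :: t) k = p.2 + pvW t k := by simp [pvW, List.filter_cons, hk]
      rw [h1, ht, PySem.Dict.getD_eq_get?_getD, PySem.Dict.get?_mk_cons]
      simp [hk]
    · have h1 : pvW (p :: t) k = pvW t k := by simp [pvW, List.filter_cons, hk]
      rw [h1, ih h.2, PySem.Dict.getD_eq_get?_getD, PySem.Dict.getD_eq_get?_getD,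
        PySem.Dict.get?_mk_cons]
      simp [hk]

lemma pvA_inner (l : List (String × Int)) : ∀ a b c : Int,
    l.foldl pvA_step (pvMkD a b c) =
      pvMkD (a + pvW l "support") (b + pvW l "oppose") (c + pvW l "neutral") := by
  induction l with
  | nil => intro a b c; simp [pvW]
  | cons p t ih =>
    intro a b c
    simp only [List.foldl_cons]
    by_cases h1 : p.1 = "support"
    · have : pvA_step (pvMkD a b c) p = pvMkD (a + p.2) b c := by
        simp [pvA_step, pvMkD, h1, PySem.Dict.contains, PySem.Dict.modify, PySem.Dict.getD,
          PySem.Dict.get?, PySem.Dict.insert, PySem.Dict.items]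
      rw [this, ih]
      simp [pvW, List.filter_cons, h1]; ring_nf
    · by_cases h2 : p.1 = "oppose"
      · have : pvA_step (pvMkD a b c) p = pvMkD a (b + p.2) c := by
          simp [pvA_step, pvMkD, h2, PySem.Dict.contains, PySem.Dict.modify, PySem.Dict.getD,
            PySem.Dict.get?, PySem.Dict.insert, PySem.Dict.items]
        rw [this, ih]
        simp [pvW, List.filter_cons, h2]; ring_nf
      · by_cases h3 : p.1 = "neutral"
        · have : pvA_step (pvMkD a b c) p = pvMkD a b (c + p.2) := by
            simp [pvA_step, pvMkD, h3, PySem.Dict.contains, PySem.Dict.modify, PySem.Dict.getD,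
              PySem.Dict.get?, PySem.Dict.insert, PySem.Dict.items]
          rw [this, ih]
          simp [pvW, List.filter_cons, h3]; ring_nf
        · have : pvA_step (pvMkD a b c) p = pvMkD a b c := by
            simp [pvA_step, pvMkD, PySem.Dict.contains]
            rintro (h | h | h) <;> simp_all
          rw [this, ih]
          simp [pvW, List.filter_cons, h1, h2, h3]

lemma pvA_outer (L : List (List (String × List (String × List (String × Int))))) : ∀ a b c : Int,
    L.foldl (fun sc analysis => (pvA_sent analysis).items.foldl pvA_step sc) (pvMkD a b c) =
      pvMkD (a + (L.map (fun x => pvW (pvA_sent x).items "support")).sum)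
            (b + (L.map (fun x => pvW (pvA_sent x).items "oppose")).sum)
            (c + (L.map (fun x => pvW (pvA_sent x).items "neutral")).sum) := by
  induction L with
  | nil => intro a b c; simp
  | cons x t ih =>
    intro a b c
    simp only [List.foldl_cons, List.map_cons, List.sum_cons]
    rw [pvA_inner, ih]
    simp [pvMkD, Int.add_assoc]

lemma pvB_get_eq (x : List (String × List (String × List (String × Int)))) (k : String) :
    pvW (pvA_sent x).items k = pvB_get x k := by
  have hnd : ((pvA_sent x).items.map (·.1)).Nodup := by
    have := PySem.Dict.nodup_keys_ofList (κ := String) (ν := Int)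
      ((PySem.Dict.ofList ((PySem.Dict.ofList x).getD "insights" [])).getD "stakeholder_sentiment" [])
    simpa [pvA_sent, PySem.Dict.keys] using this
  rw [pvW_eq_getD _ _ hnd]
  rfl

-- ===== VERDICT (by name: the statement is the Claim_ definition above) =====
theorem calculate_stance_distribution_py_spec : Claim_equal_calculate_stance_distribution_py := by
  intro analyses _
  unfold Spec_calculate_stance_distribution_py calculate_stance_distribution_py calculate_stance_distribution_py_alt
  have hinit : ((PySem.Dict.empty.insert "support" (0 : Int)).insert "oppose" 0).insert "neutral" 0 = pvMkD 0 0 0 := by decide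
  rw [hinit, pvA_outer]
  simp [pvMkD, PySem.Dict.items, pvB_get_eq]
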